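-- pv_equiv track=rewrite | github.com/ChinmayMittal/COL215 | Software Assignments/Assignment-2/file.py | split_term_string
-- ===== SOURCE A (Python) =====
-- def split_term_string(term):
--     """
--         "abc'" => [ "a", "b", "c'" ]
--     """
--     if(len(term) == 1):
--         return [term]
--     elif(len(term) == 2 and term[1] == "'"):
--         return [term]
--     else:
--         if(term[1] == "'"):
--             return [term[0:2]] + split_term_string(term[2:])
--         else:
--             return [term[0:1]] + split_term_string(term[1:])
-- ===== SOURCE B (Python) =====
-- def split_term_string(term):
--     # Single left-to-right index pass (no recursion, no repeated suffix slicing).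
--     out = []
--     i = 0
--     n = len(term)
--     while i < n:
--         if i + 1 < n and term[i + 1] == "'":
--             out.append(term[i:i + 2])
--             i += 2
--         else:
--             out.append(term[i])
--             i += 1
--     return out
-- ===== Notes on version B (the rewrite author's own statement) =====
-- stated objective: faster
-- what changed: Replaced A's suffix-slicing recursion (one recursive call and an O(n) slice per literal) with a single iterative index pass that appends tokens to an accumulator.
import Mathlib
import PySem

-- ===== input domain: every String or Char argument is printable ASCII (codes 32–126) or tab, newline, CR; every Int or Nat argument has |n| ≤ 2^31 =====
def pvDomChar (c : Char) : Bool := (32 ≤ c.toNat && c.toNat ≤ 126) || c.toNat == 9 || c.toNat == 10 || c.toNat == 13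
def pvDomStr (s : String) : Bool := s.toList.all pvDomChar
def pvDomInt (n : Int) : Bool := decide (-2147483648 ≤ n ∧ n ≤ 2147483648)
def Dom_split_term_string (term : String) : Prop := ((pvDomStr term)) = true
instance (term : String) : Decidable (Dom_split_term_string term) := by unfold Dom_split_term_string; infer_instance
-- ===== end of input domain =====

-- B replaces A's suffix-slicing recursion by one iterative index pass with an
-- accumulator; return values agree on every nonempty string.

-- ===== PORT A =====
-- A's recursion, on the string's character list; the slices term[0:2]/term[0:1]
-- are the evaluated prefixes [c1,c2]/[c1], term[2:]/term[1:] the matched tails;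
-- branch order follows the Python. On the empty string Python's term[1] raises
-- IndexError (the `[]` case); Pre_ excludes it.
def splitTermA : List Char → List (List Char)
  | [] => []                                             -- Python raises IndexError here
  | [c] => [[c]]                                         -- len(term) == 1
  | c1 :: c2 :: rest =>
      if rest.length = 0 ∧ c2 = '\'' then [[c1, c2]]     -- len(term) == 2 and term[1] == "'"
      else if c2 = '\'' then [c1, c2] :: splitTermA rest -- [term[0:2]] + rec(term[2:])
      else [c1] :: splitTermA (c2 :: rest)               -- [term[0:1]] + rec(term[1:])

def split_term_string (term : String) : List String :=
  (splitTermA term.toList).map String.ofList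

-- ===== PORT B =====
-- the while loop: index i scans left to right, tokens are pushed onto acc,
-- which is reversed at the end (Python appends to `out`)
def splitBLoop (cs : List Char) (i : Nat) (acc : List (List Char)) : List (List Char) :=
  if _h : i < cs.length then
    if i + 1 < cs.length ∧ cs[i+1]! = '\'' then
      splitBLoop cs (i + 2) (((cs.drop i).take 2) :: acc)
    else
      splitBLoop cs (i + 1) ([cs[i]!] :: acc)
  else acc.reverse
termination_by cs.length - i

def split_term_string_alt (term : String) : List String :=
  (splitBLoop term.toList 0 []).map String.ofList

-- ===== PRECONDITION & SPEC =====
-- Pre_ excludes only the empty string, on which Python's A raises IndexError (term[1]).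
def Pre_split_term_string (term : String) : Prop := term ≠ ""
instance (term : String) : Decidable (Pre_split_term_string term) := by unfold Pre_split_term_string; infer_instance
def pvWitness_split_term_string : String := "ab'c"

def Spec_split_term_string (term : String) (out : List String) : Prop := out = split_term_string_alt term
instance (term : String) (out : List String) : Decidable (Spec_split_term_string term out) := by unfold Spec_split_term_string; infer_instance

-- ===== CLAIM (what is proved, stated in full; the proofs are below) =====
def Claim_equal_split_term_string : Prop := ∀ (term : String), Dom_split_term_string term → Pre_split_term_string term → Spec_split_term_string term (split_term_string term)

-- ===== LEMMAS AND PROOFS =====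

theorem splitTermA_apostrophe (c1 c2 : Char) (rest : List Char) (h : c2 = '\'') :
    splitTermA (c1 :: c2 :: rest) = [c1, c2] :: splitTermA rest := by
  rcases rest with _ | ⟨r, rs⟩ <;> simp [splitTermA, h]

theorem splitBLoop_eq (cs : List Char) (i : Nat) (acc : List (List Char)) :
    splitBLoop cs i acc = acc.reverse ++ splitTermA (cs.drop i) := by
  fun_induction splitBLoop cs i acc with
  | case1 i acc h hcond ih =>
    obtain ⟨h1, h2⟩ := hcond
    have hd1 : cs.drop i = cs[i] :: cs.drop (i + 1) := List.drop_eq_getElem_cons h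
    have hd2 : cs.drop (i + 1) = cs[i+1] :: cs.drop (i + 2) := List.drop_eq_getElem_cons h1
    rw [getElem!_pos cs (i+1) h1] at h2
    rw [ih, hd1, hd2, splitTermA_apostrophe _ _ _ h2]
    simp
    rw [hd1, hd2]; rfl
  | case2 i acc h hcond ih =>
    rw [ih]
    have hd1 : cs.drop i = cs[i] :: cs.drop (i + 1) := List.drop_eq_getElem_cons h
    have hget : cs[i]! = cs[i] := getElem!_pos cs i h
    by_cases h1 : i + 1 < cs.length
    · have h2 : cs[i+1] ≠ '\'' := by
        intro hc; exact hcond ⟨h1, by rw [getElem!_pos cs (i+1) h1]; exact hc⟩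
      have hd2 : cs.drop (i + 1) = cs[i+1] :: cs.drop (i + 2) := List.drop_eq_getElem_cons h1
      rw [hd1, hd2, splitTermA]
      simp [h2, hget, ← hd2]
    · have hnil : cs.drop (i + 1) = [] := List.drop_eq_nil_of_le (by omega)
      rw [hd1, hnil]
      simp [hget, splitTermA]
  | case3 i acc h =>
    have : cs.drop i = [] := List.drop_eq_nil_of_le (by omega)
    rw [this, splitTermA]
    simp

-- ===== VERDICT (by name: the statement is the Claim_ definition above) =====
theorem split_term_string_spec : Claim_equal_split_term_string := by
  intro term _ _
  unfold Spec_split_term_string split_term_string split_term_string_alt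
  rw [splitBLoop_eq]
  simp
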